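-- pv_equiv track=rewrite | github.com/Y-Theta/algorithm-test | pythonResolve/Solution1.py | validSubarraySplit
-- ===== SOURCE A (Python) =====
-- from typing import Optional, List, Dict, Counter, Tuple
-- from math import gcd, sqrt, inf, factorial
--
-- def validSubarraySplit(nums: List[int]) -> int:
--     n = len(nums)
--     dp = [1001] * (n + 1)
--     dp[0] = 0
--     for i in range(1, n + 1):
--         for j in range(1, i + 1):
--             if gcd(nums[i - 1], nums[j - 1]) > 1:
--                 dp[i] = min(dp[i], dp[j - 1] + 1)
--     return -1 if dp[n] == 1001 else dp[n]
-- ===== SOURCE B (Python) =====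
-- def _primes(a):
--     # distinct prime factors of a (a >= 0) by trial division
--     ps = []
--     d = 2
--     while d * d <= a:
--         if a % d == 0:
--             ps.append(d)
--             while a % d == 0:
--                 a //= d
--         d += 1
--     if a > 1:
--         ps.append(a)
--     return ps
--
-- def validSubarraySplit(nums):
--     INF = 1001
--     best = {}        # prime -> min dp-value among earlier positions divisible by it
--     any_best = INF   # min dp-value among earlier positions with |value| > 1
--     zero_best = INF  # min dp-value among earlier positions with value 0
--     dp = 0           # dp[i-1] at loop entry, dp[i] at loop exit
--     for v in nums:
--         a = abs(v)
--         ps = _primes(a)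
--         if a == 0:
--             zero_best = min(zero_best, dp)
--         elif a > 1:
--             any_best = min(any_best, dp)
--             for p in ps:
--                 if p not in best or best[p] > dp:
--                     best[p] = dp
--         if a == 0:
--             q = any_best
--         elif a == 1:
--             q = INF
--         else:
--             q = zero_best
--             for p in ps:
--                 q = min(q, best.get(p, INF))
--         dp = min(INF, q + 1)
--     return -1 if dp == INF else dp
-- ===== Notes on version B (the rewrite author's own statement) =====
-- stated objective: faster
-- what changed: Replaced the O(n^2) all-pairs gcd DP by a one-pass DP that factorizes each element once and keeps, per prime (plus 'zero' and 'nonunit' buckets), the minimum dp value of earlier positions, so each position queries its own primes instead of scanning all earlier positions.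
import Mathlib
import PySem

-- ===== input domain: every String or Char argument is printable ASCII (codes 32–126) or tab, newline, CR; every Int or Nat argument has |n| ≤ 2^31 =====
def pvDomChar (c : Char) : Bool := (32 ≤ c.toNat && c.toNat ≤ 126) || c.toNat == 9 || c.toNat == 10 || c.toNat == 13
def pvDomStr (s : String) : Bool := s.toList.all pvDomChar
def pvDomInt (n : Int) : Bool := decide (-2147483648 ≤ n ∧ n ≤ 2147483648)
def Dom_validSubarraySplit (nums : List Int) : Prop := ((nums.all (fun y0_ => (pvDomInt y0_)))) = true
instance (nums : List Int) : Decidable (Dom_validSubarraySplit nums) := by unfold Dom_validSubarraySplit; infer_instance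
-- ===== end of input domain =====

-- B replaces A's O(n^2) all-pairs gcd DP by a one-pass DP that factorizes each element once and
-- keeps per-prime (plus zero/non-unit bucket) minima of earlier dp values (objective: faster).

-- ===== PORT A =====
def validSubarraySplit (nums : List Int) : Int :=
  let n := nums.length
  let dp := (List.replicate (n+1) (1001 : Int)).set 0 0
  let dp := (List.range' 1 n).foldl (fun dp i =>
    (List.range' 1 i).foldl (fun dp j =>
      if 1 < Int.gcd (nums.getD (i-1) 0) (nums.getD (j-1) 0)
      then dp.set i (min (dp.getD i 0) (dp.getD (j-1) 0 + 1))
      else dp) dp) dp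
  if dp.getD n 0 = 1001 then -1 else dp.getD n 0

-- ===== PORT B =====
-- helper `_primes` of Source B: the inner `while a % d == 0` loop
def stripFac (d a : Nat) : Nat :=
  if h : 2 ≤ d ∧ 0 < a ∧ a % d = 0 then stripFac d (a / d) else a
  termination_by a
  decreasing_by exact Nat.div_lt_self h.2.1 (by omega)

theorem stripFac_le (d a : Nat) : stripFac d a ≤ a := by
  fun_induction stripFac with
  | case1 a h ih => exact le_trans ih (Nat.div_le_self _ _)
  | case2 => exact le_refl _

-- helper `_primes` of Source B: the outer trial-division loop (call with d = 2)
def trialDiv (d a : Nat) : List Nat :=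
  if h : 2 ≤ d ∧ d * d ≤ a then
    if a % d = 0 then d :: trialDiv (d+1) (stripFac d a)
    else trialDiv (d+1) a
  else if 1 < a then [a] else []
  termination_by a + 2 - d
  decreasing_by
  · have := stripFac_le d a; have : d ≤ d * d := Nat.le_mul_of_pos_left d (by omega); omega
  · have : d ≤ d * d := Nat.le_mul_of_pos_left d (by omega); omega

def validSubarraySplit_alt (nums : List Int) : Int :=
  let s := nums.foldl (fun (s : PySem.Dict Nat Int × Int × Int × Int) v =>
    let best := s.1; let anyB := s.2.1; let zeroB := s.2.2.1; let dp := s.2.2.2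
    let a := v.natAbs
    let ps := trialDiv 2 a
    let zeroB := if a = 0 then min zeroB dp else zeroB
    let anyB := if 1 < a then min anyB dp else anyB
    let best := if 1 < a then
        ps.foldl (fun b p => match b.get? p with
          | none => b.insert p dp
          | some x => if dp < x then b.insert p dp else b) best
      else best
    let q : Int :=
      if a = 0 then anyB
      else if a = 1 then 1001
      else ps.foldl (fun q p => min q (best.getD p 1001)) zeroB
    (best, anyB, zeroB, min 1001 (q+1)))
    (PySem.Dict.empty, 1001, 1001, 0)
  if s.2.2.2 = 1001 then -1 else s.2.2.2

-- ===== PRECONDITION & SPEC =====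
def Spec_validSubarraySplit (nums : List Int) (out : Int) : Prop := out = validSubarraySplit_alt nums
instance (nums : List Int) (out : Int) : Decidable (Spec_validSubarraySplit nums out) := by unfold Spec_validSubarraySplit; infer_instance

-- ===== CLAIM (what is proved, stated in full; the proofs are below) =====
def Claim_equal_validSubarraySplit : Prop := ∀ (nums : List Int), Dom_validSubarraySplit nums → Spec_validSubarraySplit nums (validSubarraySplit nums)

-- ===== LEMMAS AND PROOFS =====

-- number theory: trialDiv 2 a lists exactly the prime divisors of a (for 1 ≤ a)
theorem stripFac_spec (d a : Nat) (hd : 2 ≤ d) (ha : 0 < a) :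
    ∃ k, a = d ^ k * stripFac d a ∧ ¬ d ∣ stripFac d a ∧ 0 < stripFac d a := by
  revert ha
  fun_induction stripFac with
  | case1 a h ih =>
    intro ha
    obtain ⟨-, -, hmod⟩ := h
    have hdvd : d ∣ a := Nat.dvd_of_mod_eq_zero hmod
    have ha' : 0 < a / d := Nat.div_pos (Nat.le_of_dvd ha hdvd) (by omega)
    obtain ⟨k, hk, hnd, hpos⟩ := ih ha'
    refine ⟨k + 1, ?_, hnd, hpos⟩
    calc a = d * (a / d) := (Nat.mul_div_cancel' hdvd).symm
    _ = d * (d ^ k * stripFac d (a / d)) := by rw [← hk]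
    _ = d ^ (k+1) * stripFac d (a / d) := by ring
  | case2 a h =>
    intro ha
    push_neg at h
    have hmod : a % d ≠ 0 := h hd ha
    exact ⟨0, by simp, fun hdvd => hmod (Nat.mod_eq_zero_of_dvd hdvd), ha⟩

theorem mem_trialDiv (d a p : Nat) (hd : 2 ≤ d) (ha : 1 ≤ a)
    (hsmall : ∀ k, 2 ≤ k → k < d → ¬ k ∣ a) :
    p ∈ trialDiv d a ↔ p.Prime ∧ p ∣ a := by
  revert hd ha hsmall
  fun_induction trialDiv with
  | case1 d a h hmod ih =>
    intro hd ha hsmall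
    obtain ⟨-, hdd⟩ := h
    have hdvd : d ∣ a := Nat.dvd_of_mod_eq_zero hmod
    obtain ⟨k, hk, hnd, hpos⟩ := stripFac_spec d a hd (by omega)
    have hdprime : Nat.Prime d := by
      rw [Nat.prime_def_lt']
      exact ⟨hd, fun m hm hmd hdvd' => hsmall m hm hmd (hdvd'.trans hdvd)⟩
    have hsd : stripFac d a ∣ a := ⟨d ^ k, hk.trans (Nat.mul_comm _ _)⟩
    have hsmall' : ∀ k', 2 ≤ k' → k' < d + 1 → ¬ k' ∣ stripFac d a := by
      intro k' h2 hlt hdvd'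
      rcases Nat.lt_or_ge k' d with hlt' | hge
      · exact hsmall k' h2 hlt' (hdvd'.trans hsd)
      · have he : k' = d := by omega
        exact hnd (he ▸ hdvd')
    rw [List.mem_cons, ih (by omega) (by omega) hsmall']
    constructor
    · rintro (rfl | ⟨hp, hpd⟩)
      · exact ⟨hdprime, hdvd⟩
      · exact ⟨hp, hpd.trans hsd⟩
    · rintro ⟨hp, hpd⟩
      by_cases hpe : p = d
      · exact Or.inl hpe
      · refine Or.inr ⟨hp, ?_⟩
        have hco : Nat.Coprime p (d ^ k) :=
          Nat.Coprime.pow_right k ((Nat.coprime_primes hp hdprime).mpr hpe)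
        exact hco.dvd_of_dvd_mul_left (by rw [← hk]; exact hpd)
  | case2 d a h hmod ih =>
    intro hd ha hsmall
    refine ih (by omega) ha ?_
    intro k' h2 hlt hdvd'
    rcases Nat.lt_or_ge k' d with hlt' | hge
    · exact hsmall k' h2 hlt' hdvd'
    · have he : k' = d := by omega
      subst he
      exact hmod (Nat.mod_eq_zero_of_dvd hdvd')
  | case3 d a h hgt =>
    intro hd ha hsmall
    have hda : a < d * d := by
      by_contra hcon
      exact h ⟨hd, by omega⟩
    have haprime : Nat.Prime a := by
      rw [Nat.prime_def_lt']
      refine ⟨hgt, ?_⟩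
      intro m hm hma hdvd'
      rcases Nat.lt_or_ge m d with hmd | hmd
      · exact hsmall m hm hmd hdvd'
      · obtain ⟨c, hc⟩ := hdvd'
        have hc0 : c ≠ 0 := by rintro rfl; omega
        have hc1 : c ≠ 1 := by rintro rfl; omega
        have hcd : c < d := by nlinarith
        exact hsmall c (by omega) hcd ⟨m, by rw [hc]; ring⟩
    simp only [List.mem_singleton]
    constructor
    · intro he; subst he; exact ⟨haprime, dvd_refl _⟩
    · rintro ⟨hp, hpd⟩; exact (Nat.prime_dvd_prime_iff_eq hp haprime).mp hpd
  | case4 d a h hgt =>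
    intro hd ha hsmall
    have ha1 : a = 1 := by omega
    subst ha1
    simp only [List.not_mem_nil, false_iff]
    rintro ⟨hp, hpd⟩
    have h1 := Nat.dvd_one.mp hpd
    have h2 := hp.one_lt
    omega

theorem mem_trialDiv2 (a p : Nat) (ha : 1 ≤ a) : p ∈ trialDiv 2 a ↔ p.Prime ∧ p ∣ a :=
  mem_trialDiv 2 a p (by omega) ha (by omega)

theorem trialDiv2_lt2 (a : Nat) (ha : a ≤ 1) : trialDiv 2 a = [] := by
  rw [trialDiv, dif_neg (by omega), if_neg (by omega)]

theorem goodIff (x y : Int) :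
    (1 < Int.gcd x y) ↔
      (if x.natAbs = 0 then 1 < y.natAbs
       else if x.natAbs = 1 then False
       else (y.natAbs = 0 ∨ ∃ p, p ∈ trialDiv 2 x.natAbs ∧ p ∈ trialDiv 2 y.natAbs)) := by
  have hg : Int.gcd x y = Nat.gcd x.natAbs y.natAbs := rfl
  by_cases ha0 : x.natAbs = 0
  · rw [if_pos ha0, hg, ha0, Nat.gcd_zero_left]
  · rw [if_neg ha0]
    by_cases ha1 : x.natAbs = 1
    · rw [if_pos ha1, hg, ha1, Nat.gcd_one_left]
      simp
    · rw [if_neg ha1, hg]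
      by_cases hb0 : y.natAbs = 0
      · rw [hb0, Nat.gcd_zero_right]
        exact ⟨fun _ => Or.inl rfl, fun _ => by omega⟩
      · constructor
        · intro h1
          obtain ⟨p, hp, hpd⟩ := Nat.exists_prime_and_dvd (show Nat.gcd x.natAbs y.natAbs ≠ 1 by omega)
          exact Or.inr ⟨p, (mem_trialDiv2 _ p (by omega)).mpr ⟨hp, hpd.trans (Nat.gcd_dvd_left _ _)⟩,
            (mem_trialDiv2 _ p (by omega)).mpr ⟨hp, hpd.trans (Nat.gcd_dvd_right _ _)⟩⟩
        · rintro (hb | ⟨p, hpa, hpb⟩)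
          · exact absurd hb hb0
          · obtain ⟨hp, hpa'⟩ := (mem_trialDiv2 _ p (by omega)).mp hpa
            obtain ⟨-, hpb'⟩ := (mem_trialDiv2 _ p (by omega)).mp hpb
            have hdg : p ∣ Nat.gcd x.natAbs y.natAbs := Nat.dvd_gcd hpa' hpb'
            have hgne : Nat.gcd x.natAbs y.natAbs ≠ 0 :=
              fun hz => ha0 (Nat.gcd_eq_zero_iff.mp hz).1
            have h1 := Nat.le_of_dvd (Nat.pos_of_ne_zero hgne) hdg
            have h2 := hp.two_le
            omega

-- generic bounded-min machinery
def bmin (f : Nat → Int) (P : Nat → Prop) [DecidablePred P] (m : Nat) : Int :=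
  (List.range m).foldl (fun q j => if P j then min q (f j) else q) 1001

theorem foldl_min_extract {α : Type} (g : α → Int) (ps : List α) (x y : Int) :
    ps.foldl (fun q p => min q (g p)) (min x y) = min x (ps.foldl (fun q p => min q (g p)) y) := by
  induction ps generalizing y with
  | nil => rfl
  | cons p ps ih => simpa [min_assoc] using ih (min y (g p))

theorem foldl_min_if_le (f : Nat → Int) (P : Nat → Prop) [DecidablePred P] (l : List Nat) (q : Int) :
    l.foldl (fun q j => if P j then min q (f j) else q) q ≤ q := by
  induction l generalizing q with
  | nil => exact le_refl q
  | cons j l ih =>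
    refine le_trans (ih _) ?_
    by_cases h : P j <;> simp [h]

theorem bmin_le (f : Nat → Int) (P : Nat → Prop) [DecidablePred P] (m : Nat) : bmin f P m ≤ 1001 :=
  foldl_min_if_le f P (List.range m) 1001

theorem bmin_succ (f : Nat → Int) (P : Nat → Prop) [DecidablePred P] (m : Nat) :
    bmin f P (m+1) = if P m then min (bmin f P m) (f m) else bmin f P m := by
  unfold bmin
  rw [List.range_succ, List.foldl_append]
  rfl

theorem bmin_congr (f : Nat → Int) (P Q : Nat → Prop) [DecidablePred P] [DecidablePred Q]
    (m : Nat) (h : ∀ j, j < m → (P j ↔ Q j)) :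
    bmin f P m = bmin f Q m := by
  unfold bmin
  refine PySem.List.foldl_congr_mem _ _ _ _ ?_
  intro acc x hx
  exact if_congr (h x (List.mem_range.mp hx)) rfl rfl

theorem bmin_false (f : Nat → Int) (P : Nat → Prop) [DecidablePred P] (m : Nat)
    (h : ∀ j, j < m → ¬ P j) :
    bmin f P m = 1001 := by
  have aux : ∀ n, bmin f (fun _ => False) n = 1001 := by
    intro n
    induction n with
    | zero => rfl
    | succ n ih => rw [bmin_succ]; simpa
  rw [bmin_congr f P (fun _ => False) m (fun j hj => iff_false_intro (h j hj)), aux]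

theorem bmin_or (f : Nat → Int) (P Q : Nat → Prop) [DecidablePred P] [DecidablePred Q] (m : Nat) :
    bmin f (fun j => P j ∨ Q j) m = min (bmin f P m) (bmin f Q m) := by
  induction m with
  | zero => rfl
  | succ m ih =>
    rw [bmin_succ, bmin_succ, bmin_succ, ih]
    by_cases hp : P m <;> by_cases hq : Q m <;> simp [hp, hq] <;> omega

theorem bmin_exists {α : Type} [DecidableEq α] (f : Nat → Int) (ps : List α)
    (Pp : α → Nat → Prop) [∀ p, DecidablePred (Pp p)] (m : Nat) :
    bmin f (fun j => ∃ p ∈ ps, Pp p j) m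
      = ps.foldl (fun q p => min q (bmin f (Pp p) m)) 1001 := by
  induction ps with
  | nil => simpa using bmin_false f _ m (by simp)
  | cons p ps ih =>
    have h1 : bmin f (fun j => ∃ p' ∈ p :: ps, Pp p' j) m
        = min (bmin f (Pp p) m) (bmin f (fun j => ∃ p' ∈ ps, Pp p' j) m) := by
      rw [bmin_congr f _ (fun j => Pp p j ∨ ∃ p' ∈ ps, Pp p' j) m
        (fun j _ => by simp)]
      exact bmin_or f _ _ m
    rw [h1, ih, List.foldl_cons]
    rw [min_comm 1001 (bmin f (Pp p) m), foldl_min_extract, min_comm]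

theorem foldl_min_plus (f : Nat → Int) (P : Nat → Prop) [DecidablePred P] (l : List Nat)
    (hf : ∀ j ∈ l, f j ≤ 1001) :
    l.foldl (fun q j => if P j then min q (f j + 1) else q) 1001
      = min 1001 ((l.foldl (fun q j => if P j then min q (f j) else q) 1001) + 1) := by
  have aux : ∀ (l : List Nat) (q : Int), q ≤ 1001 → (∀ j ∈ l, P j → f j ≤ 1001) →
      l.foldl (fun q j => if P j then min q (f j + 1) else q) (min 1001 (q+1))
        = min 1001 ((l.foldl (fun q j => if P j then min q (f j) else q) q) + 1) := by
    intro l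
    induction l with
    | nil => intro q _ _; rfl
    | cons j l ih =>
      intro q hq hf'
      by_cases h : P j
      · have hfj : f j ≤ 1001 := hf' j (by simp) h
        have e : min (min 1001 (q+1)) (f j + 1) = min 1001 ((min q (f j)) + 1) := by omega
        simp only [List.foldl_cons, h, if_true, e]
        exact ih (min q (f j)) (by omega) (fun j hj => hf' j (by simp [hj]))
      · simp only [List.foldl_cons, h, if_false]
        exact ih q hq (fun j hj => hf' j (by simp [hj]))
  have := aux l 1001 (le_refl _) (fun j hj _ => hf j hj)
  simpa using this

-- the reference DP
def specStep (nums : List Int) (ds : List Int) (i : Nat) : List Int :=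
  ds ++ [min 1001 (((List.range (i+1)).foldl
      (fun q j => if 1 < Int.gcd (nums.getD i 0) (nums.getD j 0) then min q (ds.getD j 1001) else q) 1001) + 1)]

def specDL (nums : List Int) (m : Nat) : List Int := (List.range m).foldl (specStep nums) [0]

def specD (nums : List Int) (i : Nat) : Int := (specDL nums i).getD i 1001

theorem specDL_succ (nums : List Int) (m : Nat) :
    specDL nums (m+1) = specStep nums (specDL nums m) m := by
  unfold specDL
  rw [List.range_succ, List.foldl_append]
  rfl

theorem specDL_length (nums : List Int) (m : Nat) : (specDL nums m).length = m + 1 := by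
  induction m with
  | zero => rfl
  | succ m ih => rw [specDL_succ]; unfold specStep; simp [ih]

theorem specDL_getD (nums : List Int) (m k : Nat) (h : k ≤ m) :
    (specDL nums m).getD k 1001 = specD nums k := by
  induction m with
  | zero => interval_cases k; rfl
  | succ m ih =>
    rcases Nat.lt_or_ge k (m+1) with hk | hk
    · rw [specDL_succ]
      unfold specStep
      rw [List.getD_append _ _ _ _ (by rw [specDL_length]; omega)]
      exact ih (by omega)
    · have : k = m + 1 := by omega
      subst this
      rfl

theorem specD_zero (nums : List Int) : specD nums 0 = 0 := rfl

theorem specD_succ (nums : List Int) (i : Nat) :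
    specD nums (i+1) = min 1001
      (bmin (specD nums) (fun j => 1 < Int.gcd (nums.getD i 0) (nums.getD j 0)) (i+1) + 1) := by
  show (specDL nums (i+1)).getD (i+1) 1001 = _
  rw [specDL_succ]
  unfold specStep
  rw [List.getD_append_right _ _ _ _ (by simp [specDL_length])]
  rw [specDL_length]
  simp only [Nat.add_sub_cancel_left, Nat.sub_self]
  have hfold : (List.range (i+1)).foldl
      (fun q j => if 1 < Int.gcd (nums.getD i 0) (nums.getD j 0) then min q ((specDL nums i).getD j 1001) else q) 1001
      = bmin (specD nums) (fun j => 1 < Int.gcd (nums.getD i 0) (nums.getD j 0)) (i+1) := by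
    unfold bmin
    refine PySem.List.foldl_congr_mem _ _ _ _ ?_
    intro acc j hj
    have hj' : j ≤ i := by have := List.mem_range.mp hj; omega
    rw [specDL_getD nums i j hj']
  rw [← hfold]
  rfl

theorem specD_le (nums : List Int) (i : Nat) : specD nums i ≤ 1001 := by
  cases i with
  | zero => rw [specD_zero]; omega
  | succ i => rw [specD_succ]; exact min_le_left _ _

-- proof-side names for the two fold bodies (definitionally those of the ports)
def astep (nums : List Int) (dp : List Int) (i : Nat) : List Int :=
  (List.range' 1 i).foldl (fun dp j =>
    if 1 < Int.gcd (nums.getD (i-1) 0) (nums.getD (j-1) 0)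
    then dp.set i (min (dp.getD i 0) (dp.getD (j-1) 0 + 1))
    else dp) dp

theorem getD_set (l : List Int) (i k : Nat) (v : Int) (hi : i < l.length) :
    (l.set i v).getD k 0 = if k = i then v else l.getD k 0 := by
  simp only [List.getD_eq_getElem?_getD, List.getElem?_set]
  by_cases hk : k = i
  · subst hk
    simp [hi]
  · rw [if_neg (show ¬ i = k from fun h => hk h.symm), if_neg hk]

def BState : Type := PySem.Dict Nat Int × Int × Int × Int

def bstep (s : BState) (v : Int) : BState :=
  let best := s.1; let anyB := s.2.1; let zeroB := s.2.2.1; let dp := s.2.2.2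
  let a := v.natAbs
  let ps := trialDiv 2 a
  let zeroB := if a = 0 then min zeroB dp else zeroB
  let anyB := if 1 < a then min anyB dp else anyB
  let best := if 1 < a then
      ps.foldl (fun b p => match b.get? p with
        | none => b.insert p dp
        | some x => if dp < x then b.insert p dp else b) best
    else best
  let q : Int :=
    if a = 0 then anyB
    else if a = 1 then 1001
    else ps.foldl (fun q p => min q (best.getD p 1001)) zeroB
  (best, anyB, zeroB, min 1001 (q+1))

def binit : BState := (PySem.Dict.empty, 1001, 1001, 0)

-- A computes the reference DP
theorem A_inner_gen (c : Nat → Prop) [DecidablePred c] (i : Nat) (js : List Nat)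
    (h : ∀ j ∈ js, j - 1 ≠ i) (dp : List Int) (hi : i < dp.length) :
    js.foldl (fun dp j => if c j then dp.set i (min (dp.getD i 0) (dp.getD (j-1) 0 + 1)) else dp) dp
      = dp.set i (js.foldl (fun q j => if c j then min q (dp.getD (j-1) 0 + 1) else q) (dp.getD i 0)) := by
  induction js generalizing dp with
  | nil => rw [List.getD_eq_getElem?_getD, List.getElem?_eq_getElem hi]; simp
  | cons j js ih =>
    by_cases hc : c j
    · simp only [List.foldl_cons, if_pos hc]
      rw [ih (fun j' hj' => h j' (by simp [hj'])) _ (by simpa using hi)]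
      rw [List.set_set]
      congr 1
      rw [getD_set _ _ _ _ hi, if_pos rfl]
      refine PySem.List.foldl_congr_mem _ _ _ _ ?_
      intro acc x hx
      rw [getD_set _ _ _ _ hi, if_neg (h x (by simp [hx]))]
    · simp only [List.foldl_cons, if_neg hc]
      exact ih (fun j' hj' => h j' (by simp [hj'])) dp hi

theorem A_outer (nums : List Int) (m : Nat) (hm : m ≤ nums.length) :
    (((List.range' 1 m).foldl (astep nums)
        ((List.replicate (nums.length+1) (1001 : Int)).set 0 0)).length = nums.length + 1) ∧
    ∀ k, k ≤ nums.length →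
      ((List.range' 1 m).foldl (astep nums)
        ((List.replicate (nums.length+1) (1001 : Int)).set 0 0)).getD k 0
        = if k ≤ m then specD nums k else 1001 := by
  induction m with
  | zero =>
    refine ⟨by simp, ?_⟩
    intro k hk
    simp only [List.range'_zero, List.foldl_nil]
    rw [getD_set _ _ _ _ (by simp)]
    rcases Nat.eq_zero_or_pos k with rfl | hk0
    · simp [specD_zero]
    · rw [if_neg (by omega), if_neg (by omega), List.getD_eq_getElem?_getD,
        List.getElem?_replicate, if_pos (by omega)]
      rfl
  | succ m ih =>
    have hm' : m ≤ nums.length := by omega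
    obtain ⟨ihlen, ihget⟩ := ih hm'
    rw [List.range'_1_concat, List.foldl_append, List.foldl_cons, List.foldl_nil,
      show 1 + m = m + 1 from by omega]
    set dpm := (List.range' 1 m).foldl (astep nums)
      ((List.replicate (nums.length+1) (1001 : Int)).set 0 0) with hdpm
    have hstep : astep nums dpm (m+1)
        = dpm.set (m+1) (specD nums (m+1)) := by
      unfold astep
      rw [A_inner_gen _ (m+1) _ (by intro j hj; have := List.mem_range'_1.mp hj; omega) _
        (by omega)]
      congr 1
      have hself : dpm.getD (m+1) 0 = 1001 := by rw [ihget (m+1) (by omega), if_neg (by omega)]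
      rw [hself, List.range'_eq_map_range, List.foldl_map]
      have hcongr : ∀ (acc : Int), ∀ x ∈ List.range (m+1),
          (fun (q : Int) j => if 1 < Int.gcd (nums.getD (m+1-1) 0) (nums.getD (j-1) 0) then min q (dpm.getD (j-1) 0 + 1) else q) acc (1+x)
          = (fun (q : Int) j => if 1 < Int.gcd (nums.getD m 0) (nums.getD j 0) then min q (specD nums j + 1) else q) acc x := by
        intro acc x hx
        have hx' : x < m + 1 := List.mem_range.mp hx
        have h1 : 1 + x - 1 = x := by omega
        have h2 : m + 1 - 1 = m := by omega
        simp only [h1, h2]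
        rw [ihget x (by omega), if_pos (show x ≤ m from by omega)]
      rw [PySem.List.foldl_congr_mem _ _ _ _ hcongr]
      rw [foldl_min_plus (fun j => specD nums j)
        (fun j => 1 < Int.gcd (nums.getD m 0) (nums.getD j 0)) (List.range (m+1))
        (fun j _ => specD_le nums j)]
      rw [specD_succ]
      rfl
    rw [hstep]
    refine ⟨by simpa using ihlen, ?_⟩
    intro k hk
    rw [getD_set _ _ _ _ (by omega)]
    by_cases hkm : k = m + 1
    · subst hkm; simp
    · rw [if_neg hkm, ihget k hk]
      by_cases hkm' : k ≤ m
      · rw [if_pos hkm', if_pos (by omega)]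
      · rw [if_neg hkm', if_neg (by omega)]

theorem A_eq_spec (nums : List Int) :
    validSubarraySplit nums
      = (if specD nums nums.length = 1001 then -1 else specD nums nums.length) := by
  have h := (A_outer nums nums.length (le_refl _)).2 nums.length (le_refl _)
  rw [if_pos (le_refl _)] at h
  show (if ((List.range' 1 nums.length).foldl (astep nums)
        ((List.replicate (nums.length+1) (1001 : Int)).set 0 0)).getD nums.length 0 = 1001
        then (-1 : Int)
        else ((List.range' 1 nums.length).foldl (astep nums)
          ((List.replicate (nums.length+1) (1001 : Int)).set 0 0)).getD nums.length 0) = _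
  rw [h]

-- B computes the reference DP
theorem reg_getD (ps : List Nat) (b : PySem.Dict Nat Int) (dp : Int) (hdp : dp ≤ 1001) (p : Nat) :
    (ps.foldl (fun b p => match b.get? p with
        | none => b.insert p dp
        | some x => if dp < x then b.insert p dp else b) b).getD p 1001
      = if p ∈ ps then min (b.getD p 1001) dp else b.getD p 1001 := by
  induction ps generalizing b with
  | nil => simp
  | cons p' ps ih =>
    simp only [List.foldl_cons]
    have hstep : ∀ (b' : PySem.Dict Nat Int),
        b' = (match b.get? p' with
          | none => b.insert p' dp
          | some x => if dp < x then b.insert p' dp else b) →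
        b'.getD p 1001 = if p = p' then min (b.getD p 1001) dp else b.getD p 1001 := by
      intro b' hb'
      rcases hb : b.get? p' with _ | x
      · rw [hb] at hb'
        subst hb'
        rw [PySem.Dict.getD_insert]
        by_cases hpp : p = p'
        · subst hpp
          have : b.getD p 1001 = 1001 := by simp [PySem.Dict.getD, hb]
          simp [this]
          omega
        · simp [hpp]
      · rw [hb] at hb'
        replace hb' : b' = if dp < x then b.insert p' dp else b := hb'
        have hx : b.getD p' 1001 = x := by simp [PySem.Dict.getD, hb]
        by_cases hdx : dp < x
        · rw [if_pos hdx] at hb'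
          subst hb'
          rw [PySem.Dict.getD_insert]
          by_cases hpp : p = p'
          · subst hpp; rw [if_pos rfl, if_pos rfl, hx]; omega
          · simp [hpp]
        · rw [if_neg hdx] at hb'
          subst hb'
          by_cases hpp : p = p'
          · subst hpp; rw [if_pos rfl, hx]; omega
          · simp [hpp]
    rw [ih, hstep _ rfl]
    by_cases hpp : p = p' <;> by_cases hps : p ∈ ps <;> simp [hpp, hps] <;> omega

theorem B_inv (nums : List Int) (m : Nat) (hm : m ≤ nums.length) :
    ((nums.take m).foldl bstep binit).2.2.2 = specD nums m ∧
    ((nums.take m).foldl bstep binit).2.1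
      = bmin (specD nums) (fun j => 1 < (nums.getD j 0).natAbs) m ∧
    ((nums.take m).foldl bstep binit).2.2.1
      = bmin (specD nums) (fun j => (nums.getD j 0).natAbs = 0) m ∧
    ∀ p, (((nums.take m).foldl bstep binit).1).getD p 1001
      = bmin (specD nums) (fun j => p ∈ trialDiv 2 (nums.getD j 0).natAbs) m := by
  induction m with
  | zero =>
    refine ⟨rfl, rfl, rfl, fun p => ?_⟩
    simp [binit, PySem.Dict.getD_empty]
    rfl
  | succ m ih =>
    have hm' : m ≤ nums.length := by omega
    have hmlt : m < nums.length := by omega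
    obtain ⟨hdp, hany, hzero, hbest⟩ := ih hm'
    have htake : nums.take (m+1) = nums.take m ++ [nums.getD m 0] := by
      rw [List.take_succ, List.getElem?_eq_getElem hmlt]
      simp [List.getD_eq_getElem?_getD, List.getElem?_eq_getElem hmlt]
    rw [htake, List.foldl_append, List.foldl_cons, List.foldl_nil]
    set s := (nums.take m).foldl bstep binit with hs
    have hdple : s.2.2.2 ≤ 1001 := by rw [hdp]; exact specD_le nums m
    have hz' : (bstep s (nums.getD m 0)).2.2.1
        = bmin (specD nums) (fun j => (nums.getD j 0).natAbs = 0) (m+1) := by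
      simp only [bstep, bmin_succ]
      by_cases ha0 : (nums.getD m 0).natAbs = 0
      · rw [if_pos ha0, if_pos ha0, hzero, hdp]
      · rw [if_neg ha0, if_neg ha0, hzero]
    have ha' : (bstep s (nums.getD m 0)).2.1
        = bmin (specD nums) (fun j => 1 < (nums.getD j 0).natAbs) (m+1) := by
      simp only [bstep, bmin_succ]
      by_cases ha1 : 1 < (nums.getD m 0).natAbs
      · rw [if_pos ha1, if_pos ha1, hany, hdp]
      · rw [if_neg ha1, if_neg ha1, hany]
    have hb' : ∀ p, ((bstep s (nums.getD m 0)).1).getD p 1001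
        = bmin (specD nums) (fun j => p ∈ trialDiv 2 (nums.getD j 0).natAbs) (m+1) := by
      intro p
      simp only [bstep, bmin_succ]
      by_cases ha1 : 1 < (nums.getD m 0).natAbs
      · rw [if_pos ha1, reg_getD _ _ _ hdple]
        by_cases hmem : p ∈ trialDiv 2 (nums.getD m 0).natAbs
        · rw [if_pos hmem, if_pos hmem, hbest, hdp]
        · rw [if_neg hmem, if_neg hmem, hbest]
      · have hempty : trialDiv 2 (nums.getD m 0).natAbs = [] := trialDiv2_lt2 _ (by omega)
        rw [if_neg ha1, hbest p, if_neg (by rw [hempty]; exact List.not_mem_nil)]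
    refine ⟨?_, ha', hz', hb'⟩
    rw [specD_succ]
    by_cases ha0 : (nums.getD m 0).natAbs = 0
    · have hgb : ∀ j, j < m + 1 →
          ((1 < Int.gcd (nums.getD m 0) (nums.getD j 0)) ↔ 1 < (nums.getD j 0).natAbs) := by
        intro j _
        rw [goodIff, if_pos ha0]
      rw [bmin_congr _ _ _ _ hgb, ← ha']
      simp only [bstep, if_pos ha0]
    · by_cases ha1 : (nums.getD m 0).natAbs = 1
      · have hgb : ∀ j, j < m + 1 → ¬ (1 < Int.gcd (nums.getD m 0) (nums.getD j 0)) := by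
          intro j _ hcon
          rw [goodIff, if_neg ha0, if_pos ha1] at hcon
          exact hcon
        rw [bmin_false _ _ _ hgb]
        simp only [bstep, if_neg ha0, if_pos ha1]
      · have h2a : 1 < (nums.getD m 0).natAbs := by omega
        have hgb : ∀ j, j < m + 1 →
            ((1 < Int.gcd (nums.getD m 0) (nums.getD j 0)) ↔
              ((nums.getD j 0).natAbs = 0 ∨ ∃ p ∈ trialDiv 2 (nums.getD m 0).natAbs,
                p ∈ trialDiv 2 (nums.getD j 0).natAbs)) := by
          intro j _
          rw [goodIff, if_neg ha0, if_neg ha1]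
        rw [bmin_congr _ _ _ _ hgb, bmin_or, bmin_exists, ← hz']
        have hfold : (trialDiv 2 (nums.getD m 0).natAbs).foldl
            (fun q p => min q (bmin (specD nums)
              (fun j => p ∈ trialDiv 2 (nums.getD j 0).natAbs) (m+1))) 1001
            = (trialDiv 2 (nums.getD m 0).natAbs).foldl
                (fun q p => min q (((bstep s (nums.getD m 0)).1).getD p 1001)) 1001 := by
          refine PySem.List.foldl_congr_mem _ _ _ _ ?_
          intro acc p _
          rw [hb' p]
        rw [hfold]
        have hsle : s.2.2.1 ≤ 1001 := by rw [hzero]; exact bmin_le _ _ _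
        simp only [bstep, if_neg ha0, if_neg ha1, if_pos h2a]
        conv_lhs => rw [show s.2.2.1 = min s.2.2.1 1001 from (min_eq_left hsle).symm]
        rw [foldl_min_extract]

theorem B_eq_spec (nums : List Int) :
    validSubarraySplit_alt nums
      = (if specD nums nums.length = 1001 then -1 else specD nums nums.length) := by
  have h := (B_inv nums nums.length (le_refl _)).1
  rw [List.take_length] at h
  show (if (nums.foldl bstep binit).2.2.2 = 1001 then (-1 : Int)
        else (nums.foldl bstep binit).2.2.2) = _
  rw [h]

-- ===== VERDICT (by name: the statement is the Claim_ definition above) =====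
theorem validSubarraySplit_spec : Claim_equal_validSubarraySplit := by
  intro nums _
  unfold Spec_validSubarraySplit
  rw [A_eq_spec, B_eq_spec]
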